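-- pv_equiv track=rewrite | github.com/yurachistic1/AdventOfCode | 2021/03.py | freqs
-- ===== SOURCE A (Python) =====
-- def freqs(list, i):
--     ones, zeros = 0, 0
--
--     for x in list:
--         if x[i] == '0':
--             zeros += 1
--         else:
--             ones += 1
--
--     return ones, zeros
-- ===== SOURCE B (Python) =====
-- def freqs(list, i):
--     # Divide and conquer: split the list in half, count each half recursively,
--     # and add the (ones, zeros) pairs. Correct because the counts are additive
--     # over a partition of the list; a non-'0' char at position i counts as a one,
--     # exactly like A's else-branch.
--     n = len(list)
--     if n == 0:
--         return 0, 0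
--     if n == 1:
--         return (0, 1) if list[0][i] == '0' else (1, 0)
--     m = n // 2
--     o1, z1 = freqs(list[:m], i)
--     o2, z2 = freqs(list[m:], i)
--     return o1 + o2, z1 + z2
-- ===== Notes on version B (the rewrite author's own statement) =====
-- stated objective: alternative
-- what changed: B replaces A's single accumulator loop with a divide-and-conquer recursion: split the list at the midpoint, count each half recursively and add the (ones, zeros) pairs.
import Mathlib
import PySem

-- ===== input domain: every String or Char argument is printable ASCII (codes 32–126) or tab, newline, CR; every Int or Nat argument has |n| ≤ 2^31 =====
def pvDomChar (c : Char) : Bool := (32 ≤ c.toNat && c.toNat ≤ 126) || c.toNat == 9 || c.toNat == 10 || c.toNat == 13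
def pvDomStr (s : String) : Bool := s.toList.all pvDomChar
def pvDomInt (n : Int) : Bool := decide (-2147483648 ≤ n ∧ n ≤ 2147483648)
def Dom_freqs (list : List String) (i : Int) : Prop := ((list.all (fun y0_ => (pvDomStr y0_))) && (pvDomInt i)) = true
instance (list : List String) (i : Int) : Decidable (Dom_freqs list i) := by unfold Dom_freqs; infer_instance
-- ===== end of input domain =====

-- B counts by divide-and-conquer (split at the midpoint, add the halves' pairs) instead of A's one-pass two-counter loop; same values on Pre_.


-- ===== PORT A =====
-- loop: ones, zeros = 0, 0; for x in list: if x[i]=='0' then zeros+=1 else ones+=1; return (ones, zeros)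
def freqs (list : List String) (i : Int) : Int × Int :=
  list.foldl
    (fun (st : Int × Int) x =>
      if PySem.Str.pyGet? x i = some '0' then (st.1, st.2 + 1) else (st.1 + 1, st.2))
    (0, 0)

-- ===== PORT B =====
-- divide and conquer: n==0 → (0,0); n==1 → test list[0][i]; else split at m = n//2,
-- recurse on list[:m] and list[m:], add the pairs componentwise.
-- The fuel argument (initialised to the list's length, which bounds the recursion depth's
-- sublist lengths) only makes the recursion structural; the 0-fuel case is never reached.
def freqsDC : Nat → List String → Int → Int × Int
  | 0, _, _ => (0, 0)
  | f + 1, list, i =>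
    if list.length = 0 then (0, 0)
    else if list.length = 1 then
      if (PySem.List.pyGet? list 0).bind (fun x => PySem.Str.pyGet? x i) = some '0'
      then (0, 1) else (1, 0)
    else
      let m : Int := PySem.Int.floordiv (list.length : Int) 2
      let p1 := freqsDC f (PySem.List.slice list none (some m)) i
      let p2 := freqsDC f (PySem.List.slice list (some m) none) i
      (p1.1 + p2.1, p1.2 + p2.2)

def freqs_alt (list : List String) (i : Int) : Int × Int :=
  freqsDC list.length list i

-- ===== PRECONDITION & SPEC =====
-- A raises IndexError when i is out of range for some string in the list; exactly those inputs are excluded.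
def Pre_freqs (list : List String) (i : Int) : Prop :=
  ∀ x ∈ list, PySem.Raise.InRange x.toList.length i
instance (list : List String) (i : Int) : Decidable (Pre_freqs list i) := by
  unfold Pre_freqs; infer_instance

def pvWitness_freqs : List String × Int := (["01", "10", "11"], 0)

def Spec_freqs (list : List String) (i : Int) (out : Int × Int) : Prop := out = freqs_alt list i
instance (list : List String) (i : Int) (out : Int × Int) : Decidable (Spec_freqs list i out) := by unfold Spec_freqs; infer_instance

-- ===== CLAIM (what is proved, stated in full; the proofs are below) =====
def Claim_equal_freqs : Prop := ∀ (list : List String) (i : Int), Dom_freqs list i → Pre_freqs list i → Spec_freqs list i (freqs list i)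

-- ===== LEMMAS AND PROOFS =====

-- both programs compute the pair (count of non-'0' at i, count of '0' at i); we prove each equal to that pair

theorem freqs_fold_acc (i : Int) (l : List String) (a b : Int) :
    l.foldl
      (fun (st : Int × Int) x =>
        if PySem.Str.pyGet? x i = some '0' then (st.1, st.2 + 1) else (st.1 + 1, st.2))
      (a, b)
    = (a + (l.countP (fun x => !(PySem.List.pyGet? x.toList i == some '0')) : Int),
       b + (l.countP (fun x => PySem.List.pyGet? x.toList i == some '0') : Int)) := by
  induction l generalizing a b with
  | nil => simp
  | cons x t ih =>
    simp only [List.foldl_cons, List.countP_cons]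
    by_cases h : PySem.Str.pyGet? x i = some '0'
    · have h' : (PySem.List.pyGet? x.toList i == some '0') = true := by simpa using h
      rw [if_pos h, ih]
      simp [h', Prod.ext_iff]
      all_goals omega
    · have h' : (PySem.List.pyGet? x.toList i == some '0') = false := by simpa using h
      rw [if_neg h, ih]
      simp [h', Prod.ext_iff]
      all_goals omega

theorem freqsDC_count (i : Int) :
    ∀ (n : Nat) (l : List String), l.length ≤ n →
    freqsDC n l i
      = ((l.countP (fun x => !(PySem.List.pyGet? x.toList i == some '0')) : Int),
         (l.countP (fun x => PySem.List.pyGet? x.toList i == some '0') : Int)) := by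
  intro n
  induction n with
  | zero =>
    intro l hl
    have : l = [] := List.eq_nil_of_length_eq_zero (Nat.le_zero.mp hl)
    subst this
    simp [freqsDC]
  | succ n ih =>
    intro l hl
    rw [freqsDC]
    by_cases h0 : l.length = 0
    · have : l = [] := List.eq_nil_of_length_eq_zero h0
      subst this; simp
    · rw [if_neg h0]
      by_cases h1 : l.length = 1
      · obtain ⟨x, rfl⟩ := List.length_eq_one_iff.mp h1
        have hx : PySem.List.pyGet? [x] (0 : Int) = some x := by
          simp [PySem.List.pyGet?, PySem.List.pyIdx?]
        rw [if_pos h1, hx]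
        by_cases h : PySem.List.pyGet? x.toList i = some '0'
        · have hs : PySem.Str.pyGet? x i = some '0' := by simpa using h
          simp [hs, h]
        · have hs : ¬ PySem.Str.pyGet? x i = some '0' := by simpa using h
          simp [hs, h]
      · rw [if_neg h1]
        have hm : PySem.Int.floordiv (l.length : Int) 2 = ((l.length / 2 : Nat) : Int) :=
          PySem.Int.floordiv_natCast l.length 2
        simp only [hm, PySem.List.slice_to_natCast, PySem.List.slice_from_natCast]
        have ht : (l.take (l.length / 2)).length ≤ n := by
          rw [List.length_take]; omega
        have hd : (l.drop (l.length / 2)).length ≤ n := by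
          rw [List.length_drop]; omega
        rw [ih _ ht, ih _ hd]
        have hsplit := List.take_append_drop (l.length / 2) l
        have hc1 : l.countP (fun x => !(PySem.List.pyGet? x.toList i == some '0'))
            = (l.take (l.length / 2)).countP (fun x => !(PySem.List.pyGet? x.toList i == some '0'))
              + (l.drop (l.length / 2)).countP (fun x => !(PySem.List.pyGet? x.toList i == some '0')) := by
          conv_lhs => rw [← hsplit]
          rw [List.countP_append]
        have hc2 : l.countP (fun x => PySem.List.pyGet? x.toList i == some '0')
            = (l.take (l.length / 2)).countP (fun x => PySem.List.pyGet? x.toList i == some '0')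
              + (l.drop (l.length / 2)).countP (fun x => PySem.List.pyGet? x.toList i == some '0') := by
          conv_lhs => rw [← hsplit]
          rw [List.countP_append]
        rw [Prod.mk.injEq]
        constructor <;> push_cast <;> omega

-- ===== VERDICT (by name: the statement is the Claim_ definition above) =====
theorem freqs_spec : Claim_equal_freqs := by
  intro list i _ _
  unfold Spec_freqs freqs
  unfold freqs_alt
  rw [freqsDC_count i list.length list le_rfl]
  simpa using freqs_fold_acc i list 0 0
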